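-- pv_equiv track=rewrite | github.com/CryptoApex23/recovery-phrase-finder | partial_recovery.py | generate_mnemonic_combinations
-- ===== SOURCE A (Python) =====
-- import itertools
--
-- def generate_mnemonic_combinations(partial_mnemonic, wordlist):
--     slots = partial_mnemonic.count('x')
--     combinations = itertools.product(wordlist, repeat=slots)
--
--     for combo in combinations:
--         mnemonic = partial_mnemonic
--         for word in combo:
--             mnemonic = mnemonic.replace('x', word, 1)
--         yield mnemonic
-- ===== SOURCE B (Python) =====
-- def generate_mnemonic_combinations(partial_mnemonic, wordlist):
--     # Recursive backtracking over the remaining slot count instead of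
--     # itertools.product plus an inner replace loop; same order and values.
--     def fill(s, k):
--         if k == 0:
--             yield s
--             return
--         for word in wordlist:
--             yield from fill(s.replace('x', word, 1), k - 1)
--     yield from fill(partial_mnemonic, partial_mnemonic.count('x'))
-- ===== Notes on version B (the rewrite author's own statement) =====
-- stated objective: alternative
-- what changed: Replaced the itertools.product enumeration with an inner leftmost-'x' replace loop by direct recursive backtracking on the remaining slot count, replacing one slot per recursion level.
import Mathlib
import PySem

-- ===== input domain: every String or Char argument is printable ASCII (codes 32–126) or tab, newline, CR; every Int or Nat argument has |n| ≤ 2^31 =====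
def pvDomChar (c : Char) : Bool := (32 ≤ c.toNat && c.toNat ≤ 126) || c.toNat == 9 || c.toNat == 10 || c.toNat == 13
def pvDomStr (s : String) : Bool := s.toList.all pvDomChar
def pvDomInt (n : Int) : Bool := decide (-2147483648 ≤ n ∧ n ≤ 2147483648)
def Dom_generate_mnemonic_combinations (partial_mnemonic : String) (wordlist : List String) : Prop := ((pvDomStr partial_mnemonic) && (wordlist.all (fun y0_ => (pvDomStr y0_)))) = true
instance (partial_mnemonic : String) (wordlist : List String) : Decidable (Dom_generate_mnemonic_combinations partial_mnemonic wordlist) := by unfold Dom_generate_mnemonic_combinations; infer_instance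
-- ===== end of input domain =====

-- B replaces the itertools.product + inner replace loop with recursive backtracking
-- on the remaining slot count (objective: alternative decomposition, same cost).


-- ===== PORT A =====
-- exact port of s.replace('x', word, 1): replace the leftmost 'x' character only
def pvReplaceOnceX (cs : List Char) (w : List Char) : List Char :=
  match cs with
  | [] => []
  | c :: rest => if c = 'x' then w ++ rest else c :: pvReplaceOnceX rest w

def pvReplace1 (s w : String) : String := String.ofList (pvReplaceOnceX s.toList w.toList)

-- port of itertools.product(wordlist, repeat=k): first coordinate varies slowest
def pvProduct (wl : List String) : Nat → List (List String)
  | 0 => [[]]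
  | k + 1 => wl.flatMap (fun w => (pvProduct wl k).map (fun r => w :: r))

def generate_mnemonic_combinations (partial_mnemonic : String) (wordlist : List String) : List String :=
  (pvProduct wordlist (PySem.Str.count partial_mnemonic "x")).map
    (fun combo => combo.foldl (fun mnemonic word => pvReplace1 mnemonic word) partial_mnemonic)

-- ===== PORT B =====
-- recursive backtracking: fill(s, k) yields s when k = 0, else recurses per word
def pvFill (wl : List String) (s : String) : Nat → List String
  | 0 => [s]
  | k + 1 => wl.flatMap (fun word => pvFill wl (pvReplace1 s word) k)

def generate_mnemonic_combinations_alt (partial_mnemonic : String) (wordlist : List String) : List String :=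
  pvFill wordlist partial_mnemonic (PySem.Str.count partial_mnemonic "x")

-- ===== PRECONDITION & SPEC =====
def Spec_generate_mnemonic_combinations (partial_mnemonic : String) (wordlist : List String) (out : List String) : Prop := out = generate_mnemonic_combinations_alt partial_mnemonic wordlist
instance (partial_mnemonic : String) (wordlist : List String) (out : List String) : Decidable (Spec_generate_mnemonic_combinations partial_mnemonic wordlist out) := by unfold Spec_generate_mnemonic_combinations; infer_instance

-- ===== CLAIM (what is proved, stated in full; the proofs are below) =====
def Claim_equal_generate_mnemonic_combinations : Prop := ∀ (partial_mnemonic : String) (wordlist : List String), Dom_generate_mnemonic_combinations partial_mnemonic wordlist → Spec_generate_mnemonic_combinations partial_mnemonic wordlist (generate_mnemonic_combinations partial_mnemonic wordlist)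

-- ===== LEMMAS AND PROOFS =====
theorem pvProduct_map_foldl (wl : List String) (k : Nat) :
    ∀ s : String,
      (pvProduct wl k).map (fun combo => combo.foldl (fun m w => pvReplace1 m w) s)
        = pvFill wl s k := by
  induction k with
  | zero => intro s; simp [pvProduct, pvFill]
  | succ k ih =>
    intro s
    simp only [pvProduct, pvFill, List.map_flatMap, List.map_map]
    refine List.flatMap_congr (fun w _ => ?_)
    simpa [Function.comp, List.foldl_cons] using ih (pvReplace1 s w)

-- ===== VERDICT (by name: the statement is the Claim_ definition above) =====
theorem generate_mnemonic_combinations_spec : Claim_equal_generate_mnemonic_combinations := by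
  intro pm wl _
  unfold Spec_generate_mnemonic_combinations generate_mnemonic_combinations generate_mnemonic_combinations_alt
  exact pvProduct_map_foldl wl _ pm
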